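-- pv_equiv track=rewrite | github.com/whmc76/RoughCut | src/roughcut/providers/transcription/local_whisper.py | _max_repeated_ngram
-- ===== SOURCE A (Python) =====
-- def _max_repeated_ngram(text: str, size: int) -> int:
--     if len(text) < size * 2:
--         return 0
--     counts: dict[str, int] = {}
--     for index in range(0, len(text) - size + 1):
--         gram = text[index:index + size]
--         counts[gram] = counts.get(gram, 0) + 1
--     return max(counts.values(), default=0)
-- ===== SOURCE B (Python) =====
-- def _max_repeated_ngram(text: str, size: int) -> int:
--     if len(text) < size * 2:
--         return 0
--     grams = [text[i:i + size] for i in range(len(text) - size + 1)]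
--     grams.sort()
--     best = 0
--     run = 0
--     prev = None
--     for gram in grams:
--         run = run + 1 if gram == prev else 1
--         if run > best:
--             best = run
--         prev = gram
--     return best
-- ===== Notes on version B (the rewrite author's own statement) =====
-- stated objective: alternative
-- what changed: Replaces the hash-map count accumulation with building the list of all size-grams, sorting it, and one linear pass over adjacent equal grams tracking the longest run.
import Mathlib
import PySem

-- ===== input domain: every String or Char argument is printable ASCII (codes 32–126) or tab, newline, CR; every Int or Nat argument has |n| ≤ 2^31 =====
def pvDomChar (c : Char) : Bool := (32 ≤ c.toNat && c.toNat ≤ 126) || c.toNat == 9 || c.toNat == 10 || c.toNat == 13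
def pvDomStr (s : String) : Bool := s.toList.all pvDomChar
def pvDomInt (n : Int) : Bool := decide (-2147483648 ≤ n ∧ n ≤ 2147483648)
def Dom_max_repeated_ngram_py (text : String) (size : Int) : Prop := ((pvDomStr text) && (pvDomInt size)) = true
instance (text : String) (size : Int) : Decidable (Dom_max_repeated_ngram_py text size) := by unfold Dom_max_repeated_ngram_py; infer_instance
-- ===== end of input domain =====

-- B replaces A's hash-map count accumulation with sort-then-scan over the gram list (objective: alternative, same result).

-- ===== PORT A =====
def max_repeated_ngram_py (text : String) (size : Int) : Int :=
  if PySem.Str.len text < size * 2 then 0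
  else
    let counts : PySem.Dict String Int :=
      (PySem.List.pyRange 0 (PySem.Str.len text - size + 1) 1).foldl
        (fun d index =>
          let gram := PySem.Str.slice text (some index) (some (index + size))
          d.insert gram (d.getD gram 0 + 1)) PySem.Dict.empty
    (PySem.List.max? counts.values (fun v => v)).getD 0

-- ===== PORT B =====
-- the linear pass of Source B: current run of equal adjacent grams, best run so far
def scanRunB : List String → Int → Int → Option String → Int
  | [], best, _, _ => best
  | g :: rest, best, run, prev =>
    let run' := if some g = prev then run + 1 else 1
    let best' := if run' > best then run' else best
    scanRunB rest best' run' (some g)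

def max_repeated_ngram_py_alt (text : String) (size : Int) : Int :=
  if PySem.Str.len text < size * 2 then 0
  else
    let grams := (PySem.List.pyRange 0 (PySem.Str.len text - size + 1) 1).map
      (fun i => PySem.Str.slice text (some i) (some (i + size)))
    scanRunB (PySem.List.sorted grams (fun g => g) false) 0 0 none

-- ===== PRECONDITION & SPEC =====
def Spec_max_repeated_ngram_py (text : String) (size : Int) (out : Int) : Prop := out = max_repeated_ngram_py_alt text size
instance (text : String) (size : Int) (out : Int) : Decidable (Spec_max_repeated_ngram_py text size out) := by unfold Spec_max_repeated_ngram_py; infer_instance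

-- ===== CLAIM (what is proved, stated in full; the proofs are below) =====
def Claim_equal_max_repeated_ngram_py : Prop := ∀ (text : String) (size : Int), Dom_max_repeated_ngram_py text size → Spec_max_repeated_ngram_py text size (max_repeated_ngram_py text size)

-- ===== LEMMAS AND PROOFS =====

-- v is the maximal multiplicity of an element of l (0 for the empty list)
def PmaxP (l : List String) (v : Int) : Prop :=
  (l = [] ∧ v = 0) ∨ (∃ x ∈ l, (l.count x : Int) = v ∧ ∀ y ∈ l, (l.count y : Int) ≤ v)

theorem PmaxP_unique {l : List String} {v w : Int} (hv : PmaxP l v) (hw : PmaxP l w) : v = w := by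
  rcases hv with ⟨hl, rfl⟩ | ⟨x, hx, hcx, hbx⟩
  · rcases hw with ⟨_, rfl⟩ | ⟨y, hy, _, _⟩
    · rfl
    · subst hl; simp at hy
  · rcases hw with ⟨hl, rfl⟩ | ⟨y, hy, hcy, hby⟩
    · subst hl; simp at hx
    · have h1 := hbx y hy
      have h2 := hby x hx
      omega

theorem PmaxP_perm {l l' : List String} {v : Int} (hp : l.Perm l') (h : PmaxP l v) : PmaxP l' v := by
  rcases h with ⟨rfl, rfl⟩ | ⟨x, hx, hcx, hbx⟩
  · left; exact ⟨hp.symm.eq_nil, rfl⟩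
  · right
    refine ⟨x, hp.mem_iff.mp hx, by rw [← hp.count_eq]; exact hcx, ?_⟩
    intro y hy
    rw [← hp.count_eq]
    exact hbx y (hp.mem_iff.mpr hy)

-- A's returned value satisfies PmaxP
theorem A_val_P (grams : List String) :
    PmaxP grams ((PySem.List.max?
      ((PySem.Set.ofList grams).map (fun k => ((grams.count k : Nat) : Int))) (fun v => v)).getD 0) := by
  match hg : grams with
  | [] => left; refine ⟨rfl, ?_⟩; rfl
  | a :: t =>
    right
    have hmemset : ∀ y, y ∈ PySem.Set.ofList (a :: t) ↔ y ∈ a :: t := fun y =>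
      PySem.Set.mem_ofList (a :: t) y
    set vals := (PySem.Set.ofList (a :: t)).map (fun k => ((List.count k (a :: t) : Nat) : Int)) with hvals
    have hvne : vals ≠ [] := by
      have ha : a ∈ PySem.Set.ofList (a :: t) := (hmemset a).mpr (List.mem_cons_self)
      intro hnil
      rw [hvals] at hnil
      rcases List.map_eq_nil_iff.mp hnil with h
      rw [h] at ha; exact (List.not_mem_nil) ha
    obtain ⟨m, hm⟩ : ∃ m, PySem.List.max? vals (fun v => v) = some m := by
      cases hmx : PySem.List.max? vals (fun v => v) with
      | none => exact absurd ((PySem.List.max?_eq_none_iff vals _).mp hmx) hvne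
      | some m => exact ⟨m, rfl⟩
    rw [hm]
    have hmmem := PySem.List.max?_mem hm
    rw [hvals] at hmmem
    obtain ⟨k, hk, hkm⟩ := List.mem_map.mp hmmem
    refine ⟨k, (hmemset k).mp hk, by simpa using hkm, ?_⟩
    intro y hy
    have hyv : ((List.count y (a :: t) : Nat) : Int) ∈ vals := by
      rw [hvals]; exact List.mem_map.mpr ⟨y, (hmemset y).mpr hy, rfl⟩
    simpa using PySem.List.max?_isMax hm _ hyv

-- recursive max group length of a (sorted) list
def gmax : List String → Int
  | [] => 0
  | x :: t => max (((t.takeWhile (· == x)).length : Int) + 1) (gmax (t.dropWhile (· == x)))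
termination_by l => l.length
decreasing_by
  simp only [List.length_cons]
  exact Nat.lt_succ_of_le (List.length_dropWhile_le _ _)

theorem gmax_nonneg (l : List String) : 0 ≤ gmax l := by
  induction l using gmax.induct with
  | case1 => simp [gmax]
  | case2 x t ih => rw [gmax]; omega

theorem ite_gt_eq_max (a b : Int) : (if a > b then a else b) = max b a := by
  rw [max_def]; split_ifs <;> omega

theorem scan_replicate (n : Nat) (x : String) (rest : List String) (best run : Int)
    (h : run ≤ best) :
    scanRunB (List.replicate n x ++ rest) best run (some x)
      = scanRunB rest (max best (run + n)) (run + n) (some x) := by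
  induction n generalizing best run with
  | zero => simp only [List.replicate, List.nil_append, Nat.cast_zero, add_zero, max_eq_left h]
  | succ n ih =>
    rw [List.replicate_succ, List.cons_append]
    simp only [scanRunB, if_true]
    rw [ite_gt_eq_max, ih (max best (run + 1)) (run + 1) (le_max_right _ _)]
    congr 1 <;> push_cast <;> omega

theorem scan_enter (n : Nat) (x : String) (rest : List String) (best run : Int)
    (prev : Option String) (hprev : prev ≠ some x) (hn : 1 ≤ n) (hb : 0 ≤ best) :
    scanRunB (List.replicate n x ++ rest) best run prev
      = scanRunB rest (max best n) n (some x) := by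
  obtain ⟨m, rfl⟩ : ∃ m, n = m + 1 := ⟨n - 1, by omega⟩
  rw [List.replicate_succ, List.cons_append]
  simp only [scanRunB, if_neg (fun hh : some x = prev => hprev hh.symm)]
  rw [ite_gt_eq_max, scan_replicate m x rest (max best 1) 1 (le_max_right _ _)]
  congr 1 <;> push_cast <;> omega

-- group decomposition of a sorted list
theorem not_mem_dropWhile (x : String) (t : List String)
    (hle : ∀ y ∈ t, x ≤ y) (hp : t.Pairwise (· ≤ ·)) : x ∉ t.dropWhile (· == x) := by
  induction t with
  | nil => simp
  | cons a t' ih =>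
    by_cases ha : (a == x) = true
    · rw [List.dropWhile_cons, if_pos ha]
      exact ih (fun y hy => hle y (List.mem_cons_of_mem _ hy)) hp.of_cons
    · rw [List.dropWhile_cons, if_neg ha]
      intro hx
      have haxne : a ≠ x := by simpa using ha
      rcases List.mem_cons.mp hx with h | hx'
      · exact haxne h.symm
      · have h1 : x ≤ a := hle a List.mem_cons_self
        have h2 : a ≤ x := (List.pairwise_cons.mp hp).1 x hx'
        exact haxne (le_antisymm h2 h1)

theorem sorted_decomp {x : String} {t : List String}
    (hs : (x :: t).Pairwise (· ≤ ·)) :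
    x :: t = List.replicate ((t.takeWhile (· == x)).length + 1) x ++ t.dropWhile (· == x)
      ∧ x ∉ t.dropWhile (· == x) ∧ (t.dropWhile (· == x)).Pairwise (· ≤ ·) := by
  have htw : t.takeWhile (· == x) = List.replicate (t.takeWhile (· == x)).length x := by
    rw [List.eq_replicate_iff]
    exact ⟨rfl, fun b hb => by simpa using List.mem_takeWhile_imp hb⟩
  refine ⟨?_, not_mem_dropWhile x t (List.pairwise_cons.mp hs).1 hs.of_cons,
    List.Pairwise.sublist (List.dropWhile_sublist _) hs.of_cons⟩
  rw [List.replicate_succ, List.cons_append, ← htw, List.takeWhile_append_dropWhile]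

theorem scan_eq_gmax : ∀ (s : List String), s.Pairwise (· ≤ ·) →
    ∀ (best run : Int) (prev : Option String), 0 ≤ best → (∀ y ∈ s, prev ≠ some y) →
    scanRunB s best run prev = max best (gmax s) := by
  intro s
  induction s using gmax.induct with
  | case1 =>
    intro _ best run prev hb _
    show best = max best (gmax [])
    rw [gmax]; omega
  | case2 x t ih =>
    intro hs best run prev hb hprev
    obtain ⟨hdec, hxdw, hpw⟩ := sorted_decomp hs
    rw [gmax, hdec]
    rw [scan_enter ((t.takeWhile (· == x)).length + 1) x _ best run prev
        (hprev x List.mem_cons_self) (by omega) hb]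
    rw [ih hpw _ ((((t.takeWhile (· == x)).length + 1 : Nat) : Int)) (some x)
        (le_trans hb (le_max_left _ _))
        (fun y hy hsome => hxdw (by obtain rfl := Option.some.inj hsome; exact hy))]
    push_cast
    omega

theorem gmax_P : ∀ (s : List String), s.Pairwise (· ≤ ·) → PmaxP s (gmax s) := by
  intro s
  induction s using gmax.induct with
  | case1 => intro _; left; exact ⟨rfl, by rw [gmax]⟩
  | case2 x t ih =>
    intro hs
    obtain ⟨hdec, hxdw, hpw⟩ := sorted_decomp hs
    have hPdw := ih hpw
    have hcx : List.count x (x :: t) = (t.takeWhile (· == x)).length + 1 := by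
      rw [hdec, List.count_append, List.count_replicate_self, List.count_eq_zero.mpr hxdw]
    have hcy : ∀ y ∈ t.dropWhile (· == x), List.count y (x :: t) = List.count y (t.dropWhile (· == x)) := by
      intro y hy
      have hyx : ¬((x == y) = true) := by
        intro h
        obtain rfl := beq_iff_eq.mp h
        exact hxdw hy
      rw [hdec, List.count_append, List.count_replicate, if_neg hyx, Nat.zero_add]
    have hmem : ∀ y, y ∈ x :: t ↔ y = x ∨ y ∈ t.dropWhile (· == x) := by
      intro y
      conv_lhs => rw [hdec]
      simp [List.mem_append, List.mem_replicate]
    rw [gmax]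
    have hbound : ∀ y ∈ x :: t, (List.count y (x :: t) : Int)
        ≤ max (((t.takeWhile (· == x)).length : Int) + 1) (gmax (t.dropWhile (· == x))) := by
      intro y hy
      rcases (hmem y).mp hy with rfl | hy'
      · rw [hcx]; push_cast; omega
      · rw [hcy y hy']
        have hle : (List.count y (t.dropWhile (· == x)) : Int) ≤ gmax (t.dropWhile (· == x)) := by
          rcases hPdw with ⟨hnil, _⟩ | ⟨w, hw, hcw, hbw⟩
          · rw [hnil] at hy'; cases hy'
          · exact hbw y hy'
        omega
    right
    by_cases hcase : gmax (t.dropWhile (· == x)) ≤ ((t.takeWhile (· == x)).length : Int) + 1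
    · refine ⟨x, List.mem_cons_self, ?_, hbound⟩
      rw [hcx]; push_cast; omega
    · rcases hPdw with ⟨hnil, h0⟩ | ⟨w, hw, hcw, hbw⟩
      · exfalso; rw [h0] at hcase; omega
      · refine ⟨w, (hmem w).mpr (Or.inr hw), ?_, hbound⟩
        rw [hcy w hw, hcw]
        omega

-- ===== VERDICT (by name: the statement is the Claim_ definition above) =====
theorem max_repeated_ngram_py_spec : Claim_equal_max_repeated_ngram_py := by
  intro text size _
  unfold Spec_max_repeated_ngram_py max_repeated_ngram_py max_repeated_ngram_py_alt
  by_cases h : PySem.Str.len text < size * 2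
  · rw [if_pos h, if_pos h]
  · rw [if_neg h, if_neg h]
    dsimp only
    set grams := (PySem.List.pyRange 0 (PySem.Str.len text - size + 1) 1).map
      (fun i => PySem.Str.slice text (some i) (some (i + size))) with hgrams
    set s := PySem.List.sorted grams (fun g => g) false with hsdef
    have hpair : s.Pairwise (· ≤ ·) := PySem.List.sorted_pairwise grams (fun g => g)
    -- A side
    have hfold : (PySem.List.pyRange 0 (PySem.Str.len text - size + 1) 1).foldl
        (fun d index =>
          let gram := PySem.Str.slice text (some index) (some (index + size))
          d.insert gram (d.getD gram 0 + 1)) PySem.Dict.empty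
        = PySem.Dict.counter grams := by
      rw [hgrams, ← PySem.Dict.foldl_insert_getD_add_one_eq_counter, List.foldl_map]
    rw [hfold]
    have hvals : (PySem.Dict.counter grams).values
        = (PySem.Set.ofList grams).map (fun k => ((grams.count k : Nat) : Int)) := by
      show ((PySem.Dict.counter grams).items.map (·.2)) = _
      rw [PySem.Dict.items_counter, List.map_map]
      rfl
    rw [hvals]
    have hA := A_val_P grams
    -- B side
    have hB0 : scanRunB s 0 0 none = gmax s := by
      rw [scan_eq_gmax s hpair 0 0 none le_rfl (by intro y _ h; cases h)]
      have := gmax_nonneg s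
      omega
    have hBP : PmaxP grams (gmax s) :=
      PmaxP_perm (PySem.List.sorted_perm grams (fun g => g) false) (gmax_P s hpair)
    rw [hB0]
    exact PmaxP_unique hA hBP
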